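-- pv_equiv track=rewrite | github.com/zhangshubin01/Clawith | integrations/clawith-ide-acp/server.py | _infer_tool_kind
-- ===== SOURCE A (Python) =====
-- def _infer_tool_kind(name: str) -> str:
--     """E: Infer ACP ToolKind from tool name for richer IDE visualisation."""
--     n = name.lower()
--     if any(k in n for k in ("delete", "remove", "rm", "unlink", "drop", "trash")):
--         return "delete"
--     if any(k in n for k in ("move", "rename", "mv", "copy", "cp")):
--         return "move"
--     if any(k in n for k in ("search", "find", "grep", "query", "lookup", "list", "glob")):
--         return "search"
--     if any(k in n for k in ("fetch", "browse", "navigate", "http", "url", "web", "download")):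
--         return "fetch"
--     if any(k in n for k in ("think", "reason", "analyze", "plan", "reflect")):
--         return "think"
--     if any(k in n for k in ("execute", "run", "shell", "terminal", "cmd", "bash", "command")):
--         return "execute"
--     if any(k in n for k in ("write", "edit", "create", "update", "patch", "insert", "save")):
--         return "edit"
--     if any(k in n for k in ("read", "cat", "view", "show", "open", "load", "get")):
--         return "read"
--     return "other"
-- ===== SOURCE B (Python) =====
-- _KINDS = ["delete", "move", "search", "fetch", "think", "execute", "edit", "read"]
--
-- # keyword -> priority index into _KINDS (all keywords have length 2..8)
-- _KW_PRIORITY = {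
--     "delete": 0, "remove": 0, "rm": 0, "unlink": 0, "drop": 0, "trash": 0,
--     "move": 1, "rename": 1, "mv": 1, "copy": 1, "cp": 1,
--     "search": 2, "find": 2, "grep": 2, "query": 2, "lookup": 2, "list": 2, "glob": 2,
--     "fetch": 3, "browse": 3, "navigate": 3, "http": 3, "url": 3, "web": 3, "download": 3,
--     "think": 4, "reason": 4, "analyze": 4, "plan": 4, "reflect": 4,
--     "execute": 5, "run": 5, "shell": 5, "terminal": 5, "cmd": 5, "bash": 5, "command": 5,
--     "write": 6, "edit": 6, "create": 6, "update": 6, "patch": 6, "insert": 6, "save": 6,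
--     "read": 7, "cat": 7, "view": 7, "show": 7, "open": 7, "load": 7, "get": 7,
-- }
--
--
-- def _infer_tool_kind(name: str) -> str:
--     # Slide over every substring of length 2..8 of the lowered name, looking each
--     # up in the keyword->priority map, and keep the smallest priority seen.
--     n = name.lower()
--     best = 8
--     for i in range(len(n)):
--         for j in range(i + 2, i + 9):
--             p = _KW_PRIORITY.get(n[i:j], 8)
--             if p < best:
--                 best = p
--     return _KINDS[best] if best < 8 else "other"
-- ===== Notes on version B (the rewrite author's own statement) =====
-- stated objective: alternative
-- what changed: Instead of testing each keyword against the whole name, B slides over the name's O(n) windows of length 2-8, looks each window up in a precomputed keyword->priority hash map, keeps the minimum priority seen, and indexes the kind table by it.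
import Mathlib
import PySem

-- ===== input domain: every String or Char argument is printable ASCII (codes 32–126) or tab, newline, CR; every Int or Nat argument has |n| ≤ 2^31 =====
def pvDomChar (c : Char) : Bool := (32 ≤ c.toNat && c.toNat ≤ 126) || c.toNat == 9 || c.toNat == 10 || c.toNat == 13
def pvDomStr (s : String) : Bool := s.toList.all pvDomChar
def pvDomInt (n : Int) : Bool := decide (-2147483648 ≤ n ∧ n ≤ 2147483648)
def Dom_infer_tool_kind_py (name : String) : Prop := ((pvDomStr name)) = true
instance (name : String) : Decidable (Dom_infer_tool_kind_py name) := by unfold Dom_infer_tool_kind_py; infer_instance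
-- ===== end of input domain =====

-- B replaces A's keyword-group if-chain by a sliding-window scan: every substring of
-- length 2..8 of the lowered name is looked up in a keyword->priority map and the
-- minimal priority found indexes the kind table ("alternative" objective).

set_option maxRecDepth 100000


-- ===== PORT A =====
def infer_tool_kind_py (name : String) : String :=
  let n := PySem.Str.lower name
  if ["delete", "remove", "rm", "unlink", "drop", "trash"].any (fun k => PySem.Str.isIn k n) then "delete"
  else if ["move", "rename", "mv", "copy", "cp"].any (fun k => PySem.Str.isIn k n) then "move"
  else if ["search", "find", "grep", "query", "lookup", "list", "glob"].any (fun k => PySem.Str.isIn k n) then "search"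
  else if ["fetch", "browse", "navigate", "http", "url", "web", "download"].any (fun k => PySem.Str.isIn k n) then "fetch"
  else if ["think", "reason", "analyze", "plan", "reflect"].any (fun k => PySem.Str.isIn k n) then "think"
  else if ["execute", "run", "shell", "terminal", "cmd", "bash", "command"].any (fun k => PySem.Str.isIn k n) then "execute"
  else if ["write", "edit", "create", "update", "patch", "insert", "save"].any (fun k => PySem.Str.isIn k n) then "edit"
  else if ["read", "cat", "view", "show", "open", "load", "get"].any (fun k => PySem.Str.isIn k n) then "read"
  else "other"

-- ===== PORT B =====
-- Source B's _KINDS table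
def pvKinds : List String := ["delete", "move", "search", "fetch", "think", "execute", "edit", "read"]

-- Source B's _KW_PRIORITY dict (keyword -> priority index; all keywords have length 2..8)
def pvKw : PySem.Dict String Nat := PySem.Dict.ofList
  [("delete", 0), ("remove", 0), ("rm", 0), ("unlink", 0), ("drop", 0), ("trash", 0),
   ("move", 1), ("rename", 1), ("mv", 1), ("copy", 1), ("cp", 1),
   ("search", 2), ("find", 2), ("grep", 2), ("query", 2), ("lookup", 2), ("list", 2), ("glob", 2),
   ("fetch", 3), ("browse", 3), ("navigate", 3), ("http", 3), ("url", 3), ("web", 3), ("download", 3),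
   ("think", 4), ("reason", 4), ("analyze", 4), ("plan", 4), ("reflect", 4),
   ("execute", 5), ("run", 5), ("shell", 5), ("terminal", 5), ("cmd", 5), ("bash", 5), ("command", 5),
   ("write", 6), ("edit", 6), ("create", 6), ("update", 6), ("patch", 6), ("insert", 6), ("save", 6),
   ("read", 7), ("cat", 7), ("view", 7), ("show", 7), ("open", 7), ("load", 7), ("get", 7)]

-- '_KINDS[best] if best < 8 else "other"': the indexing is guarded by best < 8, so getD is exact
def infer_tool_kind_py_alt (name : String) : String :=
  let n := PySem.Str.lower name
  let best := (PySem.List.pyRange 0 (PySem.Str.len n : Int) 1).foldl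
    (fun best i =>
      (PySem.List.pyRange (i + 2) (i + 9) 1).foldl
        (fun best j =>
          let p := PySem.Dict.getD pvKw (PySem.Str.slice n (some i) (some j)) 8
          if p < best then p else best) best) 8
  if best < 8 then pvKinds.getD best "other" else "other"

-- ===== PRECONDITION & SPEC =====
def Spec_infer_tool_kind_py (name : String) (out : String) : Prop := out = infer_tool_kind_py_alt name
instance (name : String) (out : String) : Decidable (Spec_infer_tool_kind_py name out) := by unfold Spec_infer_tool_kind_py; infer_instance

-- ===== CLAIM (what is proved, stated in full; the proofs are below) =====
def Claim_equal_infer_tool_kind_py : Prop := ∀ (name : String), Dom_infer_tool_kind_py name → Spec_infer_tool_kind_py name (infer_tool_kind_py name)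

-- ===== LEMMAS AND PROOFS =====

-- the keyword groups of A, in priority order (proof-only view)
def pvGroups : List (List String) :=
  [["delete", "remove", "rm", "unlink", "drop", "trash"],
   ["move", "rename", "mv", "copy", "cp"],
   ["search", "find", "grep", "query", "lookup", "list", "glob"],
   ["fetch", "browse", "navigate", "http", "url", "web", "download"],
   ["think", "reason", "analyze", "plan", "reflect"],
   ["execute", "run", "shell", "terminal", "cmd", "bash", "command"],
   ["write", "edit", "create", "update", "patch", "insert", "save"],
   ["read", "cat", "view", "show", "open", "load", "get"]]

def pvMatched (g : Nat) (n : String) : Bool := (pvGroups.getD g []).any (fun k => PySem.Str.isIn k n)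

def pvMinf (b p : Nat) : Nat := if p < b then p else b

-- the value B looks up at window [i, j)
def pvVal (n : String) (i j : Int) : Nat :=
  PySem.Dict.getD pvKw (PySem.Str.slice n (some i) (some j)) 8

def pvVals (n : String) : List Nat :=
  (PySem.List.pyRange 0 (PySem.Str.len n : Int) 1).flatMap
    (fun i => (PySem.List.pyRange (i + 2) (i + 9) 1).map (fun j => pvVal n i j))

-- fold-min facts
theorem pv_foldl_minf_le_init (l : List Nat) (b : Nat) : l.foldl pvMinf b ≤ b := by
  induction l generalizing b with
  | nil => simp
  | cons x xs ih =>
    simp only [List.foldl]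
    exact le_trans (ih _) (by unfold pvMinf; split <;> omega)

theorem pv_foldl_minf_le_mem (l : List Nat) (b x : Nat) (hx : x ∈ l) : l.foldl pvMinf b ≤ x := by
  induction l generalizing b with
  | nil => simp at hx
  | cons y ys ih =>
    simp only [List.foldl]
    rcases List.mem_cons.mp hx with h | h
    · subst h
      exact le_trans (pv_foldl_minf_le_init _ _) (by unfold pvMinf; split <;> omega)
    · exact ih _ h

theorem pv_foldl_minf_cases (l : List Nat) (b : Nat) :
    l.foldl pvMinf b = b ∨ l.foldl pvMinf b ∈ l := by
  induction l generalizing b with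
  | nil => left; rfl
  | cons x xs ih =>
    simp only [List.foldl]
    rcases ih (pvMinf b x) with h | h
    · rw [h]; unfold pvMinf; split
      · right; simp
      · left; rfl
    · right; exact List.mem_cons_of_mem _ h

-- a nested minf fold is a minf fold over the flattened value list
theorem pv_foldl_nested (g : Int → List Nat) (xs : List Int) (b : Nat) :
    xs.foldl (fun b i => (g i).foldl pvMinf b) b = (xs.flatMap g).foldl pvMinf b := by
  induction xs generalizing b with
  | nil => rfl
  | cons x xs ih => simp only [List.foldl, List.flatMap_cons, List.foldl_append]; exact ih _

-- B in terms of pvVals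
theorem pv_alt_eq (name : String) :
    infer_tool_kind_py_alt name =
      (if (pvVals (PySem.Str.lower name)).foldl pvMinf 8 < 8
       then pvKinds.getD ((pvVals (PySem.Str.lower name)).foldl pvMinf 8) "other" else "other") := by
  rw [infer_tool_kind_py_alt]
  have h : ∀ (n : String),
      (PySem.List.pyRange 0 (PySem.Str.len n : Int) 1).foldl
        (fun best i =>
          (PySem.List.pyRange (i + 2) (i + 9) 1).foldl
            (fun best j =>
              let p := PySem.Dict.getD pvKw (PySem.Str.slice n (some i) (some j)) 8
              if p < best then p else best) best) 8
      = (pvVals n).foldl pvMinf 8 := by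
    intro n
    rw [pvVals, ← pv_foldl_nested]
    congr 1
    funext b i
    rw [List.foldl_map]
    rfl
  rw [h]

-- concrete facts about the keyword table, all decided
set_option maxRecDepth 10000 in
theorem pv_items_facts : ∀ p ∈ pvKw.items, p.2 < 8 ∧ p.1 ∈ pvGroups.getD p.2 [] := by decide

set_option maxRecDepth 10000 in
theorem pv_groups_facts : ∀ g ∈ List.range 8, ∀ k ∈ pvGroups.getD g [],
    2 ≤ k.toList.length ∧ k.toList.length ≤ 8 ∧ PySem.Dict.getD pvKw k 8 = g := by decide

-- soundness: a looked-up value < 8 means its keyword group has a member occurring in n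
theorem pv_sound (n : String) (p : Nat) (hp : p ∈ pvVals n) (h8 : p < 8) :
    pvMatched p n = true := by
  rcases List.mem_flatMap.mp hp with ⟨i, hi, hL⟩
  rcases List.mem_map.mp hL with ⟨j, hLmem, hval⟩
  rw [PySem.List.mem_pyRange_one] at hi hLmem
  have hget : PySem.Dict.get? pvKw (PySem.Str.slice n (some i) (some j)) = some p := by
    rcases hq : PySem.Dict.get? pvKw (PySem.Str.slice n (some i) (some j)) with _ | q
    · rw [pvVal, PySem.Dict.getD_eq_get?_getD, hq] at hval
      simp at hval; omega
    · rw [pvVal, PySem.Dict.getD_eq_get?_getD, hq] at hval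
      simp at hval
      have hqp : q = p := by omega
      rw [hqp]
  have hmem := PySem.Dict.mem_items_of_get?_eq_some _ hget
  have hfacts := pv_items_facts _ hmem
  have hinfix : (PySem.Str.slice n (some i) (some j)).toList <:+: n.toList := by
    rw [PySem.Str.toList_slice]
    simp only [PySem.Chars.slice_eq_listSlice]
    rw [PySem.List.slice_toNat _ hi.1 (by omega : (0:Int) ≤ j)]
    exact List.IsInfix.trans (List.take_prefix _ _).isInfix (List.drop_suffix _ _).isInfix
  have hisin := (PySem.Str.isIn_iff_infix _ _).mpr hinfix
  rw [pvMatched, List.any_eq_true]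
  exact ⟨_, hfacts.2, hisin⟩

-- completeness: a keyword of group g occurring in n makes the scan's minimum ≤ g
theorem pv_complete (n : String) (g : Nat) (hg : g < 8) (hm : pvMatched g n = true) :
    (pvVals n).foldl pvMinf 8 ≤ g := by
  rw [pvMatched, List.any_eq_true] at hm
  rcases hm with ⟨k, hk, hkin⟩
  obtain ⟨hk2, hk8, hkget⟩ := pv_groups_facts g (List.mem_range.mpr hg) k hk
  have hinfix : k.toList <:+: n.toList := (PySem.Str.isIn_iff_infix _ _).mp hkin
  rcases hinfix with ⟨s, t, hst⟩
  have hdrop : n.toList.drop s.length = k.toList ++ t := by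
    rw [← hst, List.append_assoc, List.drop_left]
  have hpre : k.toList <+: n.toList.drop s.length := hdrop ▸ List.prefix_append _ _
  have e1 : k.toList.length = k.length := String.length_toList
  have e2 : n.toList.length = n.length := String.length_toList
  have hslen : s.length < n.toList.length := by
    have := congrArg List.length hst
    simp at this; omega
  -- the window [i, j) = [s.length, s.length + |k|) looks up exactly k
  have hval : pvVal n (s.length : Int) ((s.length + k.toList.length : Nat) : Int) = g := by
    rw [pvVal]
    have hstr : PySem.Str.slice n (some (s.length : Int))
        (some ((s.length + k.toList.length : Nat) : Int)) = k := by
      apply String.toList_inj.mp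
      rw [PySem.Str.toList_slice]
      simp only [PySem.Chars.slice_eq_listSlice]
      rw [PySem.List.slice_toNat _ (by omega : (0:Int) ≤ (s.length : Int))
            (by omega : (0:Int) ≤ ((s.length + k.toList.length : Nat) : Int))]
      simp only [Int.toNat_natCast]
      have hsub : (s.length + k.toList.length) - s.length = k.toList.length := by omega
      rw [hsub]
      exact (List.prefix_iff_eq_take.mp hpre).symm
    rw [hstr]; exact hkget
  have hmemvals : g ∈ pvVals n := by
    rw [pvVals]
    apply List.mem_flatMap.mpr
    refine ⟨(s.length : Int), ?_, ?_⟩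
    · rw [PySem.List.mem_pyRange_one]
      constructor
      · omega
      · have : PySem.Str.len n = (n.length : Int) := by simp
        omega
    · apply List.mem_map.mpr
      refine ⟨((s.length + k.toList.length : Nat) : Int), ?_, hval⟩
      rw [PySem.List.mem_pyRange_one]
      constructor <;> push_cast <;> omega
  exact pv_foldl_minf_le_mem _ _ _ hmemvals

-- A as a chain over pvMatched (definitional)
theorem pv_a_eq (name : String) :
    infer_tool_kind_py name =
      (if pvMatched 0 (PySem.Str.lower name) then "delete"
       else if pvMatched 1 (PySem.Str.lower name) then "move"
       else if pvMatched 2 (PySem.Str.lower name) then "search"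
       else if pvMatched 3 (PySem.Str.lower name) then "fetch"
       else if pvMatched 4 (PySem.Str.lower name) then "think"
       else if pvMatched 5 (PySem.Str.lower name) then "execute"
       else if pvMatched 6 (PySem.Str.lower name) then "edit"
       else if pvMatched 7 (PySem.Str.lower name) then "read"
       else "other") := rfl

theorem pv_chain_eq (n : String) (b : Nat)
    (hinit : b ≤ 8)
    (hS : b < 8 → pvMatched b n = true)
    (hC : ∀ g, g < 8 → pvMatched g n = true → b ≤ g) :
    (if pvMatched 0 n then "delete"
     else if pvMatched 1 n then "move"
     else if pvMatched 2 n then "search"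
     else if pvMatched 3 n then "fetch"
     else if pvMatched 4 n then "think"
     else if pvMatched 5 n then "execute"
     else if pvMatched 6 n then "edit"
     else if pvMatched 7 n then "read"
     else "other")
    = (if b < 8 then pvKinds.getD b "other" else "other") := by
  by_cases h0 : pvMatched 0 n = true
  · have hle := hC 0 (by omega) h0
    have hbe : b = 0 := by omega
    rw [if_pos h0, hbe]; rfl
  · rw [if_neg h0]
    by_cases h1 : pvMatched 1 n = true
    · have hle := hC 1 (by omega) h1
      have hs := hS (by omega)
      have hbe : b = 1 := by interval_cases b <;> simp_all
      rw [if_pos h1, hbe]; rfl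
    · rw [if_neg h1]
      by_cases h2 : pvMatched 2 n = true
      · have hle := hC 2 (by omega) h2
        have hs := hS (by omega)
        have hbe : b = 2 := by interval_cases b <;> simp_all
        rw [if_pos h2, hbe]; rfl
      · rw [if_neg h2]
        by_cases h3 : pvMatched 3 n = true
        · have hle := hC 3 (by omega) h3
          have hs := hS (by omega)
          have hbe : b = 3 := by interval_cases b <;> simp_all
          rw [if_pos h3, hbe]; rfl
        · rw [if_neg h3]
          by_cases h4 : pvMatched 4 n = true
          · have hle := hC 4 (by omega) h4
            have hs := hS (by omega)
            have hbe : b = 4 := by interval_cases b <;> simp_all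
            rw [if_pos h4, hbe]; rfl
          · rw [if_neg h4]
            by_cases h5 : pvMatched 5 n = true
            · have hle := hC 5 (by omega) h5
              have hs := hS (by omega)
              have hbe : b = 5 := by interval_cases b <;> simp_all
              rw [if_pos h5, hbe]; rfl
            · rw [if_neg h5]
              by_cases h6 : pvMatched 6 n = true
              · have hle := hC 6 (by omega) h6
                have hs := hS (by omega)
                have hbe : b = 6 := by interval_cases b <;> simp_all
                rw [if_pos h6, hbe]; rfl
              · rw [if_neg h6]
                by_cases h7 : pvMatched 7 n = true
                · have hle := hC 7 (by omega) h7
                  have hs := hS (by omega)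
                  have hbe : b = 7 := by interval_cases b <;> simp_all
                  rw [if_pos h7, hbe]; rfl
                · rw [if_neg h7]
                  have hbe : b = 8 := by
                    by_contra hne
                    have hs := hS (by omega)
                    interval_cases b <;> simp_all
                  rw [hbe]; rfl

theorem infer_tool_kind_eq (name : String) :
    infer_tool_kind_py name = infer_tool_kind_py_alt name := by
  rw [pv_a_eq, pv_alt_eq]
  refine pv_chain_eq (PySem.Str.lower name) _
    (pv_foldl_minf_le_init _ _) ?_ ?_
  · intro hlt
    rcases pv_foldl_minf_cases (pvVals (PySem.Str.lower name)) 8 with h | h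
    · omega
    · exact pv_sound _ _ h hlt
  · intro g hg hm
    exact pv_complete _ g hg hm

-- ===== VERDICT (by name: the statement is the Claim_ definition above) =====
theorem infer_tool_kind_py_spec : Claim_equal_infer_tool_kind_py := by
  intro name _
  exact infer_tool_kind_eq name
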